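-- pv_equiv track=rewrite | github.com/BrianMills2718/agent_ecology2 | scripts/extract_relevant_context.py | extract_overview
-- ===== SOURCE A (Python) =====
-- def extract_overview(content: str) -> str:
--     """Extract overview section from markdown (after frontmatter, before first ##)."""
--     # Skip frontmatter
--     if content.startswith('---'):
--         end = content.find('---', 3)
--         if end > 0:
--             content = content[end + 3:]
--
--     # Get content before first ## header
--     lines = []
--     for line in content.split('\n'):
--         if line.startswith('## '):
--             break
--         lines.append(line)
--
--     return '\n'.join(lines).strip()
-- ===== SOURCE B (Python) =====
-- def extract_overview(content: str) -> str:
--     """Extract overview section from markdown (after frontmatter, before first ##)."""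
--     # Skip frontmatter (unchanged preamble)
--     if content.startswith('---'):
--         end = content.find('---', 3)
--         if end > 0:
--             content = content[end + 3:]
--
--     # Locate the first H2 boundary in one scan and slice the prefix
--     if content.startswith('## '):
--         return ''
--     marker = content.find('\n## ')
--     if marker != -1:
--         content = content[:marker]
--     return content.strip()
-- ===== Notes on version B (the rewrite author's own statement) =====
-- stated objective: idiomatic
-- what changed: Instead of splitting the content into a list of lines and looping with break+accumulator+join, B locates the first H2 boundary ('## ' at start, else first '\n## ') with one string search and slices the prefix.
import Mathlib
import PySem

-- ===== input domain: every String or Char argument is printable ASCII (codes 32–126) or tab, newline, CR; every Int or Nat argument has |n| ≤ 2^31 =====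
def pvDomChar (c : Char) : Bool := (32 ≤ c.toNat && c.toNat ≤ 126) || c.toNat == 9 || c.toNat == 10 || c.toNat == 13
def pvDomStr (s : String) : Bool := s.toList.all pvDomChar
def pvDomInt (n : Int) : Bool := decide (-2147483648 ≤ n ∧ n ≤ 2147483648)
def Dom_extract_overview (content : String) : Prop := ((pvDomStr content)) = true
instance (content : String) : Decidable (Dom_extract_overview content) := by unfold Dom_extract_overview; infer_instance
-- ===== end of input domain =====

-- B replaces A's split-into-lines loop (break + accumulator + join) by a single
-- string search for the first H2 boundary and a prefix slice (idiomatic decomposition).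


-- ===== PORT A =====
-- A's line loop: append each line until one starts with '## ' (then break)
def aLoop : List (List Char) → List (List Char)
  | [] => []
  | l :: rest =>
      if PySem.Chars.startswith l ['#', '#', ' '] then []
      else l :: aLoop rest

-- the frontmatter-stripping preamble, textually identical in A and B: content[end+3:] if '---'-frontmatter is closed
def stripFrontmatter (cs : List Char) : List Char :=
  if PySem.Chars.startswith cs ['-', '-', '-'] then
    let e := PySem.Chars.findFrom cs ['-', '-', '-'] 3
    if 0 < e then PySem.Chars.slice cs (some (e + 3)) none else cs
  else cs

def extract_overview (content : String) : String :=
  let cs := stripFrontmatter content.toList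
  String.ofList (PySem.Chars.strip (PySem.Chars.join ['\n'] (aLoop (PySem.Chars.splitOn cs ['\n']))))

-- ===== PORT B =====
def extract_overview_alt (content : String) : String :=
  let cs := stripFrontmatter content.toList
  if PySem.Chars.startswith cs ['#', '#', ' '] then ""
  else
    let m := PySem.Chars.find cs ['\n', '#', '#', ' ']
    let cs := if m ≠ -1 then PySem.Chars.slice cs none (some m) else cs
    String.ofList (PySem.Chars.strip cs)

-- ===== PRECONDITION & SPEC =====
def Spec_extract_overview (content : String) (out : String) : Prop := out = extract_overview_alt content
instance (content : String) (out : String) : Decidable (Spec_extract_overview content out) := by unfold Spec_extract_overview; infer_instance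

-- ===== CLAIM (what is proved, stated in full; the proofs are below) =====
def Claim_equal_extract_overview : Prop := ∀ (content : String), Dom_extract_overview content → Spec_extract_overview content (extract_overview content)

-- ===== LEMMAS AND PROOFS =====

-- splitOn.go: the accumulator distributes
theorem go_acc (fuel : Nat) (s cur : List Char) (acc : List (List Char)) :
    PySem.Chars.splitOn.go ['\n'] fuel s cur acc =
      acc.reverse ++ PySem.Chars.splitOn.go ['\n'] fuel s cur [] := by
  induction fuel generalizing s cur acc with
  | zero => rw [PySem.Chars.splitOn.go.eq_def, PySem.Chars.splitOn.go.eq_def]; simp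
  | succ f ih =>
    cases s with
    | nil => rw [PySem.Chars.splitOn.go.eq_def, PySem.Chars.splitOn.go.eq_def]; simp
    | cons c rest =>
      rw [PySem.Chars.splitOn.go.eq_def]
      conv_rhs => rw [PySem.Chars.splitOn.go.eq_def]
      by_cases hp : List.isPrefixOf ['\n'] (c :: rest) = true
      · simp only [hp, if_true]
        rw [ih _ _ (cur.reverse :: acc), ih _ _ [cur.reverse]]
        simp
      · simp only [hp]
        rw [if_neg (by simp), if_neg (by simp)]
        exact ih _ _ _

-- stepping through a separator-free string accumulates it into cur
theorem go_no_sep (fuel : Nat) (s cur : List Char) (acc : List (List Char))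
    (h : ('\n') ∉ s) (hf : s.length ≤ fuel) :
    PySem.Chars.splitOn.go ['\n'] fuel s cur acc = ((cur.reverse ++ s) :: acc).reverse := by
  induction s generalizing fuel cur with
  | nil =>
    cases fuel with
    | zero => rw [PySem.Chars.splitOn.go.eq_def]
    | succ f => rw [PySem.Chars.splitOn.go.eq_def]; simp
  | cons c t ih =>
    cases fuel with
    | zero => simp at hf
    | succ f =>
      rw [PySem.Chars.splitOn.go.eq_def]
      have hc : c ≠ '\n' := fun hc => h (hc ▸ List.mem_cons_self)
      have hp : List.isPrefixOf ['\n'] (c :: t) = false := by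
        simp [List.isPrefixOf]
        exact fun h' => hc h'.symm
      simp only [hp, Bool.false_eq_true, if_false]
      rw [ih f (c :: cur) (fun hm => h (List.mem_cons_of_mem _ hm)) (by simpa using hf)]
      simp

-- stepping through the first line reaches the separator
theorem go_through (a b cur : List Char) (acc : List (List Char)) (fuel : Nat)
    (h : ('\n') ∉ a) (hf : a.length + 1 ≤ fuel) :
    PySem.Chars.splitOn.go ['\n'] fuel (a ++ '\n' :: b) cur acc =
      PySem.Chars.splitOn.go ['\n'] (fuel - a.length - 1) b [] ((cur.reverse ++ a) :: acc) := by
  induction a generalizing fuel cur with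
  | nil =>
    cases fuel with
    | zero => omega
    | succ f =>
      rw [PySem.Chars.splitOn.go.eq_def]
      simp [List.isPrefixOf]
  | cons c t ih =>
    cases fuel with
    | zero => omega
    | succ f =>
      rw [PySem.Chars.splitOn.go.eq_def]
      have hc : c ≠ '\n' := fun hc => h (hc ▸ List.mem_cons_self)
      have hp : List.isPrefixOf ['\n'] (c :: (t ++ '\n' :: b)) = false := by
        simp [List.isPrefixOf]
        exact fun h' => hc h'.symm
      simp only [List.cons_append, hp, Bool.false_eq_true, if_false]
      rw [ih (c :: cur) f (fun hm => h (List.mem_cons_of_mem _ hm)) (by simpa using hf)]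
      have : f + 1 - (c :: t).length - 1 = f - t.length - 1 := by simp
      rw [this]
      simp

-- splitOn of a string without the separator
theorem splitOn_no_sep (s : List Char) (h : '\n' ∉ s) :
    PySem.Chars.splitOn s ['\n'] = [s] := by
  unfold PySem.Chars.splitOn
  rw [go_no_sep _ _ _ _ h (by omega)]
  simp

-- splitOn peels the first line
theorem splitOn_cons (a b : List Char) (h : '\n' ∉ a) :
    PySem.Chars.splitOn (a ++ '\n' :: b) ['\n'] = a :: PySem.Chars.splitOn b ['\n'] := by
  unfold PySem.Chars.splitOn
  rw [go_through _ _ _ _ _ h (by simp)]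
  have : (a ++ '\n' :: b).length + 1 - a.length - 1 = b.length + 1 := by simp; omega
  rw [this, go_acc]
  simp

-- find.go: the starting index shifts the result
theorem find_go_shift (sub s : List Char) (x : Nat) :
    PySem.Chars.find.go sub s x =
      if PySem.Chars.find.go sub s 0 = -1 then -1 else x + PySem.Chars.find.go sub s 0 := by
  induction s generalizing x with
  | nil =>
    rw [PySem.Chars.find.go.eq_1, PySem.Chars.find.go.eq_1]
    by_cases he : sub.isEmpty = true
    · simp [he]
    · simp [he]
  | cons c t ih =>
    rw [PySem.Chars.find.go.eq_2]
    conv_rhs => rw [PySem.Chars.find.go.eq_2]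
    by_cases hp : sub.isPrefixOf (c :: t) = true
    · simp [hp]
    · simp only [hp, Bool.false_eq_true, if_false]
      rw [ih (x + 1), ih 1]
      by_cases hg : PySem.Chars.find.go sub t 0 = -1
      · simp [hg]
      · simp only [hg, if_false]
        have hge : (-1 : Int) ≤ PySem.Chars.find.go sub t 0 := PySem.Chars.neg_one_le_find t sub
        split_ifs with h3 <;> omega

-- find of '\n## ' across the first line
theorem find_cons (a b : List Char) (h : '\n' ∉ a) :
    PySem.Chars.find (a ++ '\n' :: b) ['\n', '#', '#', ' '] =
      if List.isPrefixOf ['#', '#', ' '] b then (a.length : Int)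
      else if PySem.Chars.find b ['\n', '#', '#', ' '] = -1 then -1
      else (a.length : Int) + 1 + PySem.Chars.find b ['\n', '#', '#', ' '] := by
  induction a with
  | nil =>
    simp only [PySem.Chars.find, List.nil_append, List.length_nil, Nat.cast_zero]
    rw [PySem.Chars.find.go.eq_2]
    have hpp : List.isPrefixOf ['\n', '#', '#', ' '] ('\n' :: b) = List.isPrefixOf ['#', '#', ' '] b := by
      simp [List.isPrefixOf]
    rw [hpp]
    by_cases hb : List.isPrefixOf ['#', '#', ' '] b = true
    · simp [hb]
    · simp only [hb, Bool.false_eq_true, if_false]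
      rw [find_go_shift]
      split_ifs <;> omega
  | cons c t ih =>
    have hc : c ≠ '\n' := fun hcc => h (hcc ▸ List.mem_cons_self)
    simp only [PySem.Chars.find, List.cons_append] at ih ⊢
    rw [PySem.Chars.find.go.eq_2]
    have hnp : List.isPrefixOf ['\n', '#', '#', ' '] (c :: (t ++ '\n' :: b)) = false := by
      simp [List.isPrefixOf]
      intro h'
      exact absurd h'.symm hc
    rw [hnp]
    simp only [Bool.false_eq_true, if_false]
    rw [find_go_shift, ih (fun hm => h (List.mem_cons_of_mem _ hm))]
    have hge : (-1 : Int) ≤ PySem.Chars.find.go ['\n', '#', '#', ' '] b 0 :=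
      PySem.Chars.neg_one_le_find b ['\n', '#', '#', ' ']
    simp only [List.length_cons]
    split_ifs <;> push_cast <;> omega

-- a prefix free of c stops before an occurrence of c
theorem prefix_before_sep {H a b : List Char} {c : Char} (hH : c ∉ H)
    (hp : H <+: a ++ c :: b) (ha : c ∉ a) : H <+: a := by
  induction H generalizing a with
  | nil => exact List.nil_prefix
  | cons x H' ih =>
    cases a with
    | nil =>
      rw [List.nil_append, List.cons_prefix_cons] at hp
      exact absurd (hp.1 ▸ List.mem_cons_self) hH
    | cons y a' =>
      rw [List.cons_append, List.cons_prefix_cons] at hp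
      exact List.cons_prefix_cons.mpr
        ⟨hp.1, ih (fun hm => hH (List.mem_cons_of_mem _ hm)) hp.2
          (fun hm => ha (List.mem_cons_of_mem _ hm))⟩

-- decompose a string at its first newline
theorem first_nl (cs : List Char) (hmem : '\n' ∈ cs) :
    ∃ a b, cs = a ++ '\n' :: b ∧ '\n' ∉ a := by
  induction cs with
  | nil => simp at hmem
  | cons c t ih =>
    by_cases hc : c = '\n'
    · exact ⟨[], t, by simp [hc], by simp⟩
    · obtain ⟨a, b, h1, h2⟩ := ih (by
        rcases List.mem_cons.mp hmem with h | h
        · exact absurd h.symm hc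
        · exact h)
      refine ⟨c :: a, b, by rw [h1]; rfl, ?_⟩
      intro hm
      rcases List.mem_cons.mp hm with h | h
      · exact hc h.symm
      · exact h2 h

-- the main equivalence of the two cores
theorem main_core (cs : List Char) :
    (PySem.Chars.join ['\n'] (aLoop (PySem.Chars.splitOn cs ['\n'])) =
      (if PySem.Chars.startswith cs ['#', '#', ' '] then []
       else if PySem.Chars.find cs ['\n', '#', '#', ' '] = -1 then cs
       else cs.take (PySem.Chars.find cs ['\n', '#', '#', ' ']).toNat))
    ∧ (aLoop (PySem.Chars.splitOn cs ['\n']) = [] ↔ PySem.Chars.startswith cs ['#', '#', ' '] = true) := by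
  suffices h : ∀ (n : Nat) (cs : List Char), cs.length ≤ n →
      ((PySem.Chars.join ['\n'] (aLoop (PySem.Chars.splitOn cs ['\n'])) =
        (if PySem.Chars.startswith cs ['#', '#', ' '] then []
         else if PySem.Chars.find cs ['\n', '#', '#', ' '] = -1 then cs
         else cs.take (PySem.Chars.find cs ['\n', '#', '#', ' ']).toNat))
      ∧ (aLoop (PySem.Chars.splitOn cs ['\n']) = [] ↔ PySem.Chars.startswith cs ['#', '#', ' '] = true)) by
    exact h cs.length cs le_rfl
  intro n
  induction n with
  | zero =>
    intro cs hlen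
    have hnil : cs = [] := List.eq_nil_of_length_eq_zero (Nat.le_zero.mp hlen)
    subst hnil
    decide
  | succ m ih =>
    intro cs hlen
    by_cases hmem : '\n' ∈ cs
    · obtain ⟨a, b, hcs, hna⟩ := first_nl cs hmem
      subst hcs
      have hblen : b.length ≤ m := by rw [List.length_append, List.length_cons] at hlen; omega
      obtain ⟨ihj, ihe⟩ := ih b hblen
      have hswiff : PySem.Chars.startswith (a ++ '\n' :: b) ['#', '#', ' '] =
          PySem.Chars.startswith a ['#', '#', ' '] := by
        rw [Bool.eq_iff_iff, PySem.Chars.startswith_iff, PySem.Chars.startswith_iff]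
        constructor
        · intro hp; exact prefix_before_sep (by decide) hp hna
        · intro hp; exact hp.trans (List.prefix_append _ _)
      rw [splitOn_cons a b hna]
      by_cases hswa : PySem.Chars.startswith a ['#', '#', ' '] = true
      · refine ⟨?_, ?_⟩ <;>
          simp [aLoop, hswa, hswiff, PySem.Chars.join_nil]
      · have hswa' : PySem.Chars.startswith a ['#', '#', ' '] = false :=
          Bool.eq_false_iff.mpr hswa
        have hLoop : aLoop (a :: PySem.Chars.splitOn b ['\n']) =
            a :: aLoop (PySem.Chars.splitOn b ['\n']) := by
          simp [aLoop, hswa']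
        refine ⟨?_, ?_⟩
        · rw [hLoop]
          simp only [hswiff, hswa', Bool.false_eq_true, if_false]
          rw [find_cons a b hna]
          by_cases hswb : List.isPrefixOf ['#', '#', ' '] b = true
          · have hempty : aLoop (PySem.Chars.splitOn b ['\n']) = [] := ihe.mpr hswb
            rw [hempty, PySem.Chars.join_singleton]
            simp only [hswb, if_true]
            rw [if_neg (by omega)]
            rw [Int.toNat_natCast, List.take_append]
            simp
          · have hswb' : PySem.Chars.startswith b ['#', '#', ' '] = false :=
              Bool.eq_false_iff.mpr hswb
            have hne : aLoop (PySem.Chars.splitOn b ['\n']) ≠ [] := fun he =>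
              hswb (ihe.mp he)
            obtain ⟨y, r', hr⟩ := List.exists_cons_of_ne_nil hne
            rw [hr, PySem.Chars.join_cons_cons]
            rw [hr] at ihj
            rw [hswb'] at ihj
            simp only [Bool.false_eq_true, if_false] at ihj
            simp only [hswb, Bool.false_eq_true, if_false]
            by_cases hfb : PySem.Chars.find b ['\n', '#', '#', ' '] = -1
            · rw [hfb] at ihj
              simp only [if_true] at ihj
              simp only [hfb, if_true]
              rw [ihj]
              simp
            · have hge := PySem.Chars.neg_one_le_find b ['\n', '#', '#', ' ']
              simp only [hfb, if_false] at ihj ⊢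
              have hcond : ¬((a.length : Int) + 1 + PySem.Chars.find b ['\n', '#', '#', ' '] = -1) := by
                omega
              rw [if_neg hcond, ihj]
              have htn : ((a.length : Int) + 1 + PySem.Chars.find b ['\n', '#', '#', ' ']).toNat =
                  a.length + 1 + (PySem.Chars.find b ['\n', '#', '#', ' ']).toNat := by omega
              rw [htn, List.take_append]
              have h3 : List.take (a.length + 1 + (PySem.Chars.find b ['\n', '#', '#', ' ']).toNat) a = a :=
                List.take_of_length_le (by omega)
              have h2 : a.length + 1 + (PySem.Chars.find b ['\n', '#', '#', ' ']).toNat - a.length =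
                  (PySem.Chars.find b ['\n', '#', '#', ' ']).toNat + 1 := by omega
              rw [h3, h2]
              simp
        · rw [hLoop]
          simp [hswiff, hswa']
    · rw [splitOn_no_sep cs hmem]
      have hfind : PySem.Chars.find cs ['\n', '#', '#', ' '] = -1 := by
        rw [PySem.Chars.find_eq_neg_one_iff]
        intro hin
        exact hmem (hin.subset (by simp))
      by_cases hsw : PySem.Chars.startswith cs ['#', '#', ' '] = true
      · refine ⟨?_, ?_⟩ <;> simp [aLoop, hsw, PySem.Chars.join_nil]
      · have hsw' : PySem.Chars.startswith cs ['#', '#', ' '] = false :=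
          Bool.eq_false_iff.mpr hsw
        refine ⟨?_, ?_⟩ <;>
          simp [aLoop, hsw', hfind, PySem.Chars.join_singleton]

-- ===== VERDICT (by name: the statement is the Claim_ definition above) =====
theorem extract_overview_spec : Claim_equal_extract_overview := by
  intro content _
  unfold Spec_extract_overview extract_overview extract_overview_alt
  generalize stripFrontmatter content.toList = cs2
  obtain ⟨hj, _⟩ := main_core cs2
  dsimp only
  rw [hj]
  by_cases hsw : PySem.Chars.startswith cs2 ['#', '#', ' '] = true
  · simp only [hsw, if_true]
    rfl
  · have hsw' := Bool.eq_false_iff.mpr hsw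
    simp only [hsw', Bool.false_eq_true, if_false]
    by_cases hf : PySem.Chars.find cs2 ['\n', '#', '#', ' '] = -1
    · simp [hf]
    · have hge := PySem.Chars.neg_one_le_find cs2 ['\n', '#', '#', ' ']
      simp only [hf, if_false, ne_eq, not_false_iff, if_true]
      rw [show PySem.Chars.slice cs2 none (some (PySem.Chars.find cs2 ['\n', '#', '#', ' '])) =
          cs2.take (PySem.Chars.find cs2 ['\n', '#', '#', ' ']).toNat from by
        rw [PySem.Chars.slice_eq_listSlice, PySem.List.slice_to _ (by omega)]]
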